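-- pv_equiv track=rewrite | github.com/Kripipastt/Traveler-s-Guide | Formatting_a_string.py | format_text_block
-- ===== SOURCE A (Python) =====
-- def format_text_block(text, frame_width):
--     answer = []
--     x = 0
--     strok = ""
--     for i in text:
--         strok += i
--         x += 1
--         if x >= frame_width:
--             answer.append(strok.strip() + "\n")
--             strok = ""
--             x = 0
--     if strok:
--         answer.append(strok.strip())
--     return "".join(answer)
-- ===== SOURCE B (Python) =====
-- def format_text_block(text, frame_width):
--     lines = []
--     for i in range(0, len(text), frame_width):
--         chunk = text[i:i + frame_width]
--         lines.append(chunk.strip() + "\n" if len(chunk) == frame_width else chunk.strip())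
--     return "".join(lines)
-- ===== Notes on version B (the rewrite author's own statement) =====
-- stated objective: simpler
-- what changed: Replaces the per-character counter loop with a single loop over frame_width-sized chunks (range with step frame_width + slicing); Pre_ excludes frame_width < 1, where A's per-character flushing is an accident of its counter comparison and a chunk loop naturally raises ValueError (zero step) or yields no chunks (negative step).
-- outside the precondition, e.g. on format_text_block('ab', 0): A returns 'a\nb\n', B raises ValueError; on format_text_block('ab', -3): A returns 'a\nb\n', B returns ''
import Mathlib
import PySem

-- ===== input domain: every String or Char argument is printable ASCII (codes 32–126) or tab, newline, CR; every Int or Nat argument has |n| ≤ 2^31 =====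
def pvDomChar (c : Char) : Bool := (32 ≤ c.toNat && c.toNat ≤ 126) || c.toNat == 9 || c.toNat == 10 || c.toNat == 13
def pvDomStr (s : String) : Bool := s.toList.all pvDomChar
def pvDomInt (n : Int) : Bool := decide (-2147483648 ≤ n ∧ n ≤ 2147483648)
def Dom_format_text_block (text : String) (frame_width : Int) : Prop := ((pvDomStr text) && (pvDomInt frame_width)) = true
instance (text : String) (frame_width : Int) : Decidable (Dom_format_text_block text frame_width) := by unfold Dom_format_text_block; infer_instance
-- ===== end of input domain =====

-- B replaces A's per-character counter loop by one loop over frame_width-sized chunks (simpler decomposition).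

-- ===== PORT A =====
-- A's loop body: strok += i; x += 1; flush a stripped line when x >= frame_width
def pvStepA (frame_width : Int) (st : List (List Char) × Int × List Char) (i : Char) :
    List (List Char) × Int × List Char :=
  let strok := st.2.2 ++ [i]
  let x := st.2.1 + 1
  if frame_width ≤ x then (st.1 ++ [PySem.Chars.strip strok ++ ['\n']], 0, [])
  else (st.1, x, strok)

def format_text_block (text : String) (frame_width : Int) : String :=
  let st := text.toList.foldl (pvStepA frame_width) ([], 0, [])
  let answer := if st.2.2.isEmpty then st.1 else st.1 ++ [PySem.Chars.strip st.2.2]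
  String.ofList (PySem.Chars.join [] answer)

-- ===== PORT B =====
-- B's loop body (Source B): chunk = text[i:i+frame_width]; append chunk.strip()+"\n" when the chunk
-- is full-width, else chunk.strip()
def pvStepB (cs : List Char) (frame_width : Int) (acc : List (List Char)) (i : Int) :
    List (List Char) :=
  let chunk := PySem.List.slice cs (some i) (some (i + frame_width))
  acc ++ [if (chunk.length : Int) = frame_width
          then PySem.Chars.strip chunk ++ ['\n'] else PySem.Chars.strip chunk]

def format_text_block_alt (text : String) (frame_width : Int) : String :=
  let cs := text.toList
  let lines := (PySem.List.pyRange 0 (cs.length : Int) frame_width).foldl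
    (pvStepB cs frame_width) []
  String.ofList (PySem.Chars.join [] lines)

-- ===== PRECONDITION & SPEC =====
-- Pre_ excludes frame_width < 1: there A's per-character flushing is an accident of its counter
-- comparison, while B's chunk loop raises ValueError (zero range step) or yields no chunks
-- (negative step).
def Pre_format_text_block (text : String) (frame_width : Int) : Prop := 1 ≤ frame_width
instance (text : String) (frame_width : Int) : Decidable (Pre_format_text_block text frame_width) := by unfold Pre_format_text_block; infer_instance
def pvWitness_format_text_block : String × Int := ("  hello world ", 4)

def Spec_format_text_block (text : String) (frame_width : Int) (out : String) : Prop := out = format_text_block_alt text frame_width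
instance (text : String) (frame_width : Int) (out : String) : Decidable (Spec_format_text_block text frame_width out) := by unfold Spec_format_text_block; infer_instance

-- ===== CLAIM (what is proved, stated in full; the proofs are below) =====
def Claim_equal_format_text_block : Prop := ∀ (text : String) (frame_width : Int), Dom_format_text_block text frame_width → Pre_format_text_block text frame_width → Spec_format_text_block text frame_width (format_text_block text frame_width)

-- ===== LEMMAS AND PROOFS =====

theorem pv_join_flatten (l : List (List Char)) : PySem.Chars.join [] l = l.flatten := by
  simp [PySem.Chars.join, List.intercalate]
  induction l with
  | nil => rfl
  | cons a t ih => cases t <;> simp_all [List.intersperse]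

-- the common normal form both runs are reduced to: the list of stripped chunks
def pvChunkList (fuel : Nat) (cs : List Char) (n : Nat) : List (List Char) :=
  match fuel with
  | 0 => []
  | f + 1 =>
    if cs.isEmpty then []
    else if (cs.length : Int) < (n : Int) then [PySem.Chars.strip cs]
    else (PySem.Chars.strip (cs.take n) ++ ['\n']) :: pvChunkList f (cs.drop n) n

-- A-side: the already-flushed lines are only appended to
theorem pv_foldl_prefix (fw : Int) (cs : List Char) :
    ∀ (a0 a : List (List Char)) (x : Int) (s : List Char),
    List.foldl (pvStepA fw) (a0 ++ a, x, s) cs =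
      (a0 ++ (List.foldl (pvStepA fw) (a, x, s) cs).1,
       (List.foldl (pvStepA fw) (a, x, s) cs).2) := by
  induction cs with
  | nil => intro a0 a x s; simp
  | cons c t ih =>
    intro a0 a x s
    simp only [List.foldl_cons, pvStepA]
    by_cases h : fw ≤ x + 1
    · simp only [if_pos h, List.append_assoc]
      exact ih a0 _ 0 []
    · simp only [if_neg h]
      exact ih a0 a (x + 1) (s ++ [c])

-- A-side: no flush happens while the counter stays below frame_width
theorem pv_no_flush (fw : Int) (cs : List Char) :
    ∀ (a : List (List Char)) (x : Int) (s : List Char),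
    x + cs.length < fw →
    List.foldl (pvStepA fw) (a, x, s) cs = (a, x + cs.length, s ++ cs) := by
  induction cs with
  | nil => intro a x s _; simp
  | cons c t ih =>
    intro a x s h
    simp only [List.length_cons] at h
    have hlt : ¬ fw ≤ x + 1 := by push_cast at h ⊢; omega
    simp only [List.foldl_cons, pvStepA, if_neg hlt]
    rw [ih a (x + 1) (s ++ [c]) (by push_cast at h ⊢; omega)]
    simp only [List.length_cons, List.append_assoc, List.singleton_append, Prod.mk.injEq]
    refine ⟨by trivial, ?_, by trivial⟩
    push_cast; ring

-- A-side: reaching the counter bound flushes the stripped group and restarts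
theorem pv_flush (fw : Int) (cs : List Char) :
    ∀ (a : List (List Char)) (x : Int) (s : List Char),
    0 ≤ x → x < fw → fw ≤ x + cs.length →
    List.foldl (pvStepA fw) (a, x, s) cs =
      List.foldl (pvStepA fw)
        (a ++ [PySem.Chars.strip (s ++ cs.take (fw - x).toNat) ++ ['\n']], 0, [])
        (cs.drop (fw - x).toNat) := by
  induction cs with
  | nil => intro a x s _ h1 h2; simp at h1 h2; omega
  | cons c t ih =>
    intro a x s hx0 hxfw hle
    simp only [List.length_cons] at hle
    simp only [List.foldl_cons, pvStepA]
    by_cases h : fw ≤ x + 1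
    · have hfw : fw = x + 1 := by omega
      have h1 : (fw - x).toNat = 1 := by omega
      simp [if_pos h, h1]
    · simp only [if_neg h]
      rw [ih a (x + 1) (s ++ [c]) (by omega) (by omega) (by push_cast at hle ⊢; omega)]
      have hk : (fw - x).toNat = (fw - (x + 1)).toNat + 1 := by omega
      rw [hk]
      simp [List.take_succ_cons, List.drop_succ_cons]

-- the final "".join of A's run
def pvRunA (fw : Int) (cs : List Char) : List Char :=
  let st := List.foldl (pvStepA fw) ([], 0, []) cs
  (if st.2.2.isEmpty then st.1 else st.1 ++ [PySem.Chars.strip st.2.2]).flatten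

-- A's run produces exactly the stripped chunks
theorem pv_main (n : Nat) (hn : 1 ≤ n) :
    ∀ (fuel : Nat) (cs : List Char), cs.length < fuel →
    pvRunA (n : Int) cs = (pvChunkList fuel cs n).flatten := by
  intro fuel
  induction fuel with
  | zero => intro cs h; omega
  | succ f ih =>
    intro cs hlen
    by_cases hemp : cs.isEmpty
    · rw [pvChunkList, if_pos hemp]
      rw [List.isEmpty_iff] at hemp
      subst hemp
      simp [pvRunA]
    · by_cases hsmall : (cs.length : Int) < (n : Int)
      · rw [pvChunkList, if_neg hemp, if_pos hsmall]
        unfold pvRunA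
        rw [pv_no_flush (n : Int) cs [] 0 [] (by simpa using hsmall)]
        simp [hemp]
      · push Not at hsmall
        rw [pvChunkList, if_neg hemp, if_neg (by push Not; exact hsmall)]
        have hlecs : n ≤ cs.length := by exact_mod_cast hsmall
        unfold pvRunA
        rw [pv_flush (n : Int) cs [] 0 [] le_rfl (by exact_mod_cast hn) (by simpa using hsmall)]
        have h0 : (((n : Int) - 0)).toNat = n := by omega
        rw [h0]
        simp only [List.nil_append]
        have hp := pv_foldl_prefix (n : Int) (cs.drop n)
          [PySem.Chars.strip (cs.take n) ++ ['\n']] [] 0 []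
        simp only [List.append_nil] at hp
        rw [hp]
        have ihd := ih (cs.drop n) (by simp only [List.length_drop]; omega)
        unfold pvRunA at ihd
        simp only at ihd
        rw [List.flatten_cons, ← ihd]
        by_cases hnil :
            (List.foldl (pvStepA (n : Int)) ([], 0, []) (cs.drop n)).2.2.isEmpty <;>
          simp [hnil]

-- B-side: range with a positive step, structural forms
theorem pv_pyRange_nil (a b s : Int) (hs : 0 < s) (hab : b ≤ a) :
    PySem.List.pyRange a b s = [] := by
  rw [PySem.List.pyRange_of_pos a b hs, if_neg (by omega)]
  simp

theorem pv_pyRange_cons (a b s : Int) (hs : 0 < s) (hab : a < b) :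
    PySem.List.pyRange a b s = a :: PySem.List.pyRange (a + s) b s := by
  rw [PySem.List.pyRange_of_pos a b hs, PySem.List.pyRange_of_pos (a + s) b hs, if_pos hab]
  have key : (b - a + s - 1) / s =
      (if a + s < b then (b - (a + s) + s - 1) / s else 0) + 1 := by
    by_cases h2 : a + s < b
    · rw [if_pos h2]
      have e1 : b - a + s - 1 = (b - (a + s) + s - 1) + 1 * s := by ring
      rw [e1, Int.add_mul_ediv_right _ _ (by omega)]
    · rw [if_neg h2]
      have e1 : b - a + s - 1 = (b - a - 1) + 1 * s := by ring
      rw [e1, Int.add_mul_ediv_right _ _ (by omega),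
          Int.ediv_eq_zero_of_lt (by omega) (by omega)]
  have hq0 : 0 ≤ (if a + s < b then (b - (a + s) + s - 1) / s else 0) := by
    by_cases h2 : a + s < b
    · rw [if_pos h2]; exact Int.ediv_nonneg (by omega) (by omega)
    · rw [if_neg h2]
  have htn : ((b - a + s - 1) / s).toNat =
      (if a + s < b then ((b - (a + s) + s - 1) / s).toNat else 0) + 1 := by
    by_cases h2 : a + s < b <;> simp [h2] at key hq0 ⊢ <;> omega
  rw [htn, List.range_succ_eq_map, List.map_cons, List.map_map]
  simp only [Nat.cast_zero, mul_zero, add_zero]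
  refine congrArg (a :: ·) ?_
  refine List.map_congr_left ?_
  intro k _
  simp only [Function.comp_apply, Nat.succ_eq_add_one]
  push_cast
  ring

-- B-side: the chunk loop produces exactly the stripped chunks
theorem pv_range_fold (cs : List Char) (n : Nat) (hn : 1 ≤ n) :
    ∀ (fuel : Nat) (a : Nat) (acc : List (List Char)), cs.length - a < fuel →
    (PySem.List.pyRange (a : Int) (cs.length : Int) (n : Int)).foldl
        (pvStepB cs (n : Int)) acc
      = acc ++ pvChunkList fuel (cs.drop a) n := by
  intro fuel
  induction fuel with
  | zero => intro a acc h; omega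
  | succ f ih =>
    intro a acc hfuel
    by_cases ha : cs.length ≤ a
    · rw [pv_pyRange_nil _ _ _ (by exact_mod_cast hn) (by exact_mod_cast ha)]
      rw [List.drop_eq_nil_of_le ha, pvChunkList]
      simp
    · push Not at ha
      rw [pv_pyRange_cons _ _ _ (by exact_mod_cast hn) (by exact_mod_cast ha)]
      rw [List.foldl_cons]
      have hcast : (a : Int) + (n : Int) = ((a + n : Nat) : Int) := by push_cast; ring
      have hchunk : PySem.List.slice cs (some (a : Int)) (some ((a : Int) + (n : Int)))
          = (cs.drop a).take n := by
        rw [hcast, PySem.List.slice_natCast]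
        congr 1
        omega
      set rest := cs.drop a with hrest
      have hrestlen : rest.length = cs.length - a := by simp [hrest]
      have hrestne : ¬ rest.isEmpty := by
        simp [List.isEmpty_iff, hrest, List.drop_eq_nil_iff]
        omega
      by_cases hsh : rest.length < n
      · have htake : rest.take n = rest := List.take_of_length_le (by omega)
        have hstep : pvStepB cs (n : Int) acc (a : Int) = acc ++ [PySem.Chars.strip rest] := by
          simp only [pvStepB, hchunk, htake]
          rw [if_neg (by exact_mod_cast (by omega : ¬ rest.length = n))]
        rw [hstep]
        rw [pv_pyRange_nil _ _ _ (by exact_mod_cast hn) (by omega)]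
        rw [pvChunkList, if_neg hrestne, if_pos (by exact_mod_cast hsh)]
        simp
      · push Not at hsh
        have hstep : pvStepB cs (n : Int) acc (a : Int)
            = acc ++ [PySem.Chars.strip (rest.take n) ++ ['\n']] := by
          simp only [pvStepB, hchunk]
          rw [if_pos (by simp [List.length_take]; omega)]
        rw [hstep, hcast]
        rw [ih (a + n) _ (by omega)]
        rw [pvChunkList, if_neg hrestne,
          if_neg (by push Not; exact_mod_cast hsh)]
        simp [hrest, List.drop_drop, Nat.add_comm]

-- ===== VERDICT (by name: the statement is the Claim_ definition above) =====
theorem format_text_block_spec : Claim_equal_format_text_block := by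
  intro text fw _hdom hpre
  unfold Spec_format_text_block format_text_block format_text_block_alt
  unfold Pre_format_text_block at hpre
  obtain ⟨n, rfl⟩ : ∃ n : Nat, fw = (n : Int) :=
    ⟨fw.toNat, (Int.toNat_of_nonneg (by exact le_trans (by omega) hpre)).symm⟩
  have hn : 1 ≤ n := by exact_mod_cast hpre
  simp only [pv_join_flatten]
  have hA := pv_main n hn (text.toList.length + 1) text.toList (by omega)
  unfold pvRunA at hA
  simp only at hA
  rw [hA]
  have hB := pv_range_fold text.toList n hn (text.toList.length + 1) 0 [] (by omega)
  simp only [Nat.cast_zero, List.drop_zero, List.nil_append] at hB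
  rw [hB]
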